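-- pv_equiv track=rewrite | github.com/AutoFiC/autofic-core | src/autofic_core/annotation/mapper.py | _normalized_match
-- ===== SOURCE A (Python) =====
-- from typing import List, Tuple, Optional
--
-- def _normalized_match(snippet_lines: List[str], file_lines: List[str]) -> Optional[Tuple[int, int]]:
--
--     normalize = lambda s: ' '.join(s.split())
--     snippet_normalized = [normalize(line) for line in snippet_lines]
--
--     for i in range(len(file_lines) - len(snippet_lines) + 1):
--         candidate_normalized = [normalize(file_lines[j]) for j in range(i, i+len(snippet_lines))]
--         if candidate_normalized == snippet_normalized:
--             return (i + 1, i + len(snippet_lines))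
--
--     return None
-- ===== SOURCE B (Python) =====
-- def _normalized_match(snippet_lines, file_lines):
--     # Rabin-Karp: normalize every line once, hash the pattern, and roll a
--     # polynomial hash across file windows, comparing lines only on a hash hit.
--     def norm(s):
--         return ' '.join(s.split())
--
--     pat = [norm(s) for s in snippet_lines]
--     lines = [norm(s) for s in file_lines]
--     m, n = len(pat), len(lines)
--     if m > n:
--         return None
--
--     P = 1000000007
--     B = 911382323
--
--     def lh(s):
--         h = 0
--         for c in s:
--             h = (h * 131 + ord(c)) % P
--         return h
--
--     hs = [lh(s) for s in lines]
--     hp = 0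
--     for s in pat:
--         hp = (hp * B + lh(s)) % P
--     h = 0
--     for v in hs[:m]:
--         h = (h * B + v) % P
--     pw = pow(B, m - 1, P) if m else 1
--
--     for i in range(n - m + 1):
--         if h == hp and lines[i:i + m] == pat:
--             return (i + 1, i + m)
--         if i + m < n:
--             h = ((h - hs[i] * pw) * B + hs[i + m]) % P
--     return None
-- ===== Notes on version B (the rewrite author's own statement) =====
-- stated objective: alternative
-- what changed: B replaces A's scan that re-normalizes every m-line window by Rabin-Karp: each line is normalized and hashed once, a polynomial hash is rolled across windows, and full line comparison happens only when the window hash equals the pattern hash.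
import Mathlib
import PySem

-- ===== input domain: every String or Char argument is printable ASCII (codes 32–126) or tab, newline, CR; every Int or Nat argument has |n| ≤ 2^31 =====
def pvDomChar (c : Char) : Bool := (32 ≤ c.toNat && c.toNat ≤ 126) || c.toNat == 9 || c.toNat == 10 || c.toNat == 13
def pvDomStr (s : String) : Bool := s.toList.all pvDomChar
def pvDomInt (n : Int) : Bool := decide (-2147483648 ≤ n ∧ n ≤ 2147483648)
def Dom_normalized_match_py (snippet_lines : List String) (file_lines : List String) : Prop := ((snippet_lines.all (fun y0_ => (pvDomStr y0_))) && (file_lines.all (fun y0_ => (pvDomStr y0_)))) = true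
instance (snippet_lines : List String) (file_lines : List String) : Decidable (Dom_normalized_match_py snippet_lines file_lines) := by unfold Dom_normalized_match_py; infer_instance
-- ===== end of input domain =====

-- B replaces A's re-normalize-every-window scan by Rabin–Karp: normalize each line once,
-- then roll a polynomial hash across windows and compare lines only on a hash hit.

-- ===== PORT A =====
-- normalize = lambda s: ' '.join(s.split())   (shared by both Pythons verbatim)
def pvNorm (s : String) : String := PySem.Str.join " " (PySem.Str.split₀ s)

-- A's for-loop with early return; file_lines[j] is always in range here (0 ≤ i ≤ j < i+m ≤ n),
-- so the IndexError default of pyGetD is never used.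
def pvLoopA (snippet_normalized : List String) (file_lines : List String) (m : Int) : List Int → Option (Int × Int)
  | [] => none
  | i :: rest =>
    let candidate_normalized := (PySem.List.pyRange i (i + m) 1).map (fun j => pvNorm (PySem.List.pyGetD file_lines j ""))
    if candidate_normalized = snippet_normalized then some (i + 1, i + m)
    else pvLoopA snippet_normalized file_lines m rest

def normalized_match_py (snippet_lines : List String) (file_lines : List String) : Option (Int × Int) :=
  let snippet_normalized := snippet_lines.map pvNorm
  pvLoopA snippet_normalized file_lines (snippet_lines.length : Int)
    (PySem.List.pyRange 0 ((file_lines.length : Int) - (snippet_lines.length : Int) + 1) 1)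

-- ===== PORT B =====  (Rabin–Karp, transliterating Source B)
def pvP : Int := 1000000007
def pvB : Int := 911382323

-- def lh(s): h = 0; for c in s: h = (h * 131 + ord(c)) % P; return h
def pvLh (s : String) : Int := s.toList.foldl (fun h c => PySem.Int.mod (h * 131 + (c.toNat : Int)) pvP) 0

-- for i in range(n-m+1): if h == hp and lines[i:i+m] == pat: return …; if i+m < n: roll h
def pvLoopB (pat lines : List String) (hs : List Int) (hp pw m n : Int) : List Int → Int → Option (Int × Int)
  | [], _ => none
  | i :: rest, h =>
    if h = hp ∧ PySem.List.slice lines (some i) (some (i + m)) = pat then some (i + 1, i + m)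
    else pvLoopB pat lines hs hp pw m n rest
      (if i + m < n then
        PySem.Int.mod ((h - PySem.List.pyGetD hs i 0 * pw) * pvB + PySem.List.pyGetD hs (i + m) 0) pvP
      else h)

def normalized_match_py_alt (snippet_lines : List String) (file_lines : List String) : Option (Int × Int) :=
  let pat := snippet_lines.map pvNorm
  let lines := file_lines.map pvNorm
  let m : Int := (pat.length : Int)
  let n : Int := (lines.length : Int)
  if m > n then none
  else
    let hs := lines.map pvLh
    let hp := pat.foldl (fun h s => PySem.Int.mod (h * pvB + pvLh s) pvP) 0
    let h0 := (PySem.List.slice hs none (some m)).foldl (fun h v => PySem.Int.mod (h * pvB + v) pvP) 0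
    let pw := if m ≠ 0 then PySem.Int.powMod pvB (m - 1).toNat pvP else 1
    pvLoopB pat lines hs hp pw m n (PySem.List.pyRange 0 (n - m + 1) 1) h0

-- ===== PRECONDITION & SPEC =====
def Spec_normalized_match_py (snippet_lines : List String) (file_lines : List String) (out : Option (Int × Int)) : Prop := out = normalized_match_py_alt snippet_lines file_lines
instance (snippet_lines : List String) (file_lines : List String) (out : Option (Int × Int)) : Decidable (Spec_normalized_match_py snippet_lines file_lines out) := by unfold Spec_normalized_match_py; infer_instance

-- ===== CLAIM (what is proved, stated in full; the proofs are below) =====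
def Claim_equal_normalized_match_py : Prop := ∀ (snippet_lines : List String) (file_lines : List String), Dom_normalized_match_py snippet_lines file_lines → Spec_normalized_match_py snippet_lines file_lines (normalized_match_py snippet_lines file_lines)

-- ===== LEMMAS AND PROOFS =====

-- exact (un-modded) polynomial hash of a window, and the modded one the loop maintains
def pvH (w : List String) : Int := w.foldl (fun h s => h * pvB + pvLh s) 0
def pvWhash (w : List String) : Int := w.foldl (fun h s => PySem.Int.mod (h * pvB + pvLh s) pvP) 0

theorem pvP_pos : (0:Int) < pvP := by norm_num [pvP]

-- fold with accumulator a0 = a0 * B^len + fold from 0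
theorem pvH_acc (w : List String) : ∀ a0 : Int,
    w.foldl (fun h s => h * pvB + pvLh s) a0 = a0 * pvB ^ w.length + pvH w := by
  induction w with
  | nil =>
    intro a0
    simp only [List.foldl_nil, List.length_nil, pow_zero, mul_one, pvH, add_zero]
  | cons s t ih =>
    intro a0
    have hc : pvH (s :: t) = t.foldl (fun h s => h * pvB + pvLh s) (0 * pvB + pvLh s) := rfl
    simp only [List.foldl_cons, List.length_cons, ih, hc]
    ring

theorem pvH_cons (a : String) (t : List String) :
    pvH (a :: t) = pvLh a * pvB ^ t.length + pvH t := by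
  have hc : pvH (a :: t) = t.foldl (fun h s => h * pvB + pvLh s) (0 * pvB + pvLh a) := rfl
  rw [hc, pvH_acc]
  ring

theorem pvH_append_singleton (t : List String) (e : String) :
    pvH (t ++ [e]) = pvH t * pvB + pvLh e := by
  simp [pvH, List.foldl_append]

-- the modded fold equals the exact fold mod P
theorem pvWhash_acc (w : List String) : ∀ a b : Int, a = b % pvP →
    w.foldl (fun h s => PySem.Int.mod (h * pvB + pvLh s) pvP) a =
      (w.foldl (fun h s => h * pvB + pvLh s) b) % pvP := by
  induction w with
  | nil => intro a b h; simpa using h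
  | cons s t ih =>
    intro a b h
    simp only [List.foldl_cons]
    apply ih
    rw [PySem.Int.mod_eq_emod_of_pos pvP_pos, h]
    exact ((Int.ModEq.mul_right pvB (Int.emod_emod_of_dvd b dvd_rfl)).add_right (pvLh s))

theorem pvWhash_eq (w : List String) : pvWhash w = pvH w % pvP := by
  simpa [pvWhash, pvH] using pvWhash_acc w 0 0 (by simp)

-- rolling step: from the hash of (a :: t) to the hash of (t ++ [e])
theorem pvRoll (a e : String) (t : List String) :
    PySem.Int.mod ((pvWhash (a :: t) - pvLh a * PySem.Int.powMod pvB t.length pvP) * pvB + pvLh e) pvP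
      = pvWhash (t ++ [e]) := by
  rw [PySem.Int.mod_eq_emod_of_pos pvP_pos, PySem.Int.powMod_eq_emod pvB t.length pvP_pos,
      pvWhash_eq, pvWhash_eq, pvH_cons, pvH_append_singleton]
  have h1 : (pvLh a * pvB ^ t.length + pvH t) % pvP ≡ pvLh a * pvB ^ t.length + pvH t [ZMOD pvP] :=
    Int.emod_emod_of_dvd _ dvd_rfl
  have h2 : pvLh a * (pvB ^ t.length % pvP) ≡ pvLh a * pvB ^ t.length [ZMOD pvP] :=
    Int.ModEq.mul_left (pvLh a) (Int.emod_emod_of_dvd _ dvd_rfl)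
  have key : ((pvLh a * pvB ^ t.length + pvH t) % pvP - pvLh a * (pvB ^ t.length % pvP)) * pvB + pvLh e
      ≡ pvH t * pvB + pvLh e [ZMOD pvP] := by
    calc ((pvLh a * pvB ^ t.length + pvH t) % pvP - pvLh a * (pvB ^ t.length % pvP)) * pvB + pvLh e
        ≡ (pvLh a * pvB ^ t.length + pvH t - pvLh a * pvB ^ t.length) * pvB + pvLh e [ZMOD pvP] :=
          ((h1.sub h2).mul_right pvB).add_right (pvLh e)
      _ = pvH t * pvB + pvLh e := by ring
  exact key

-- A's early-return loop is find? over the index list.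
theorem pvLoopA_eq_find (P : List String) (file : List String) (m : Int) (l : List Int) :
    pvLoopA P file m l =
      (l.find? (fun i =>
        decide ((PySem.List.pyRange i (i + m) 1).map (fun j => pvNorm (PySem.List.pyGetD file j "")) = P))).map
        (fun i => (i + 1, i + m)) := by
  induction l with
  | nil => rfl
  | cons i rest ih =>
    simp only [pvLoopA, List.find?]
    by_cases h : (PySem.List.pyRange i (i + m) 1).map (fun j => pvNorm (PySem.List.pyGetD file j "")) = P
    · simp [h]
    · simp [h, ih]

-- find? only depends on the predicate on members.
theorem pvFind?_congr_mem {p q : Int → Bool} (l : List Int) (h : ∀ i ∈ l, p i = q i) :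
    l.find? p = l.find? q := by
  induction l with
  | nil => rfl
  | cons i t ih =>
    simp only [List.find?, h i (List.mem_cons_self ..)]
    cases q i
    · exact ih (fun j hj => h j (List.mem_cons_of_mem _ hj))
    · rfl

-- In-range window of A equals the slice of the once-normalized file.
theorem pvWindow_eq (file : List String) (i : Int) (m : Nat)
    (h0 : 0 ≤ i) (h1 : i + m ≤ (file.length : Int)) :
    (PySem.List.pyRange i (i + m) 1).map (fun j => pvNorm (PySem.List.pyGetD file j "")) =
      PySem.List.slice (file.map pvNorm) (some i) (some (i + m)) := by
  rw [PySem.List.slice_toNat _ h0 (by omega), PySem.List.pyRange_one]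
  have htn : (i + (m : Int) - i).toNat = m := by omega
  have htn2 : ((i + (m : Int)).toNat - i.toNat) = m := by omega
  rw [htn, htn2]
  apply List.ext_getElem
  · simp; omega
  · intro k hk hk'
    have hkm : k < m := by simpa using hk
    have hidx : i + (k : Int) = ((i.toNat + k : Nat) : Int) := by omega
    simp only [List.getElem_map, List.getElem_range, List.getElem_take, List.getElem_drop]
    rw [hidx, PySem.List.pyGetD_natCast]
    have : i.toNat + k < file.length := by omega
    simp [List.getD_eq_getElem?_getD, List.getElem?_eq_getElem this]

-- windows as drop/take and their one-step decomposition
theorem pvSlice_window (lines : List String) (i : Int) (m : Nat) (h0 : 0 ≤ i) :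
    PySem.List.slice lines (some i) (some (i + m)) = (lines.drop i.toNat).take m := by
  rw [PySem.List.slice_toNat _ h0 (by omega)]
  congr 1
  omega

-- one-step window decompositions
theorem pvWindow_cons (lines : List String) (j μ : Nat) (hμ : μ ≠ 0) (hlt : j < lines.length) :
    (lines.drop j).take μ = lines[j] :: (lines.drop (j+1)).take (μ-1) := by
  obtain ⟨ν, rfl⟩ : ∃ ν, μ = ν + 1 := ⟨μ-1, by omega⟩
  rw [List.drop_eq_getElem_cons hlt, List.take_succ_cons]
  simp

theorem pvWindow_snoc (lines : List String) (j μ : Nat) (hμ : μ ≠ 0) (hlt : j + μ < lines.length) :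
    (lines.drop (j+1)).take μ = (lines.drop (j+1)).take (μ-1) ++ [lines[j+μ]] := by
  conv_lhs => rw [show μ = (μ-1)+1 by omega, List.take_add_one]
  congr 1
  rw [List.getElem?_drop]
  have h : j + 1 + (μ-1) = j + μ := by omega
  rw [h, List.getElem?_eq_getElem hlt]
  rfl

-- B's loop computes find? of the window predicate, given the hash invariant.
theorem pvLoopB_eq_find (pat lines : List String) (pw : Int)
    (hpw : pat.length ≠ 0 → pw = PySem.Int.powMod pvB (pat.length - 1) pvP) :
    ∀ (t : Nat) (k h : Int), 0 ≤ k →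
      ((lines.length : Int) - pat.length + 1 - k).toNat ≤ t →
      (k < (lines.length : Int) - pat.length + 1 →
        h = pvWhash (PySem.List.slice lines (some k) (some (k + pat.length)))) →
      pvLoopB pat lines (lines.map pvLh) (pvWhash pat) pw (pat.length : Int) (lines.length : Int)
          (PySem.List.pyRange k ((lines.length : Int) - pat.length + 1) 1) h =
        ((PySem.List.pyRange k ((lines.length : Int) - pat.length + 1) 1).find? (fun i =>
          decide (PySem.List.slice lines (some i) (some (i + (pat.length : Int))) = pat))).map
          (fun i => (i + 1, i + (pat.length : Int))) := by
  intro t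
  induction t with
  | zero =>
    intro k h hk0 ht hinv
    rw [PySem.List.pyRange_one_eq_nil (by omega)]
    rfl
  | succ t ih =>
    intro k h hk0 ht hinv
    by_cases hk : k < (lines.length : Int) - pat.length + 1
    · rw [PySem.List.pyRange_one_cons hk]
      have hWinv := hinv hk
      by_cases hmatch : PySem.List.slice lines (some k) (some (k + (pat.length : Int))) = pat
      · have hhp : h = pvWhash pat := by rw [hWinv, hmatch]
        rw [List.find?_cons_of_pos (p := fun i => decide (PySem.List.slice lines (some i) (some (i + (pat.length : Int))) = pat)) (by simpa using hmatch)]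
        have hcond : h = pvWhash pat ∧ PySem.List.slice lines (some k) (some (k + (pat.length : Int))) = pat :=
          ⟨hhp, hmatch⟩
        simp only [pvLoopB, if_pos hcond, Option.map_some]
      · have hguard : ¬ (h = pvWhash pat ∧ PySem.List.slice lines (some k) (some (k + (pat.length : Int))) = pat) :=
          fun hc => hmatch hc.2
        rw [List.find?_cons_of_neg (p := fun i => decide (PySem.List.slice lines (some i) (some (i + (pat.length : Int))) = pat)) (by simpa using hmatch)]
        simp only [pvLoopB, if_neg hguard]
        apply ih (k + 1) _ (by omega) (by omega)
        intro hk1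
        have hkm : k + (pat.length : Int) < (lines.length : Int) := by omega
        rw [if_pos hkm]
        have hμ : pat.length ≠ 0 := by
          intro h0
          apply hmatch
          rw [pvSlice_window lines k pat.length hk0, h0]
          simpa using (List.length_eq_zero_iff.mp h0).symm
        have hj : ((k.toNat : Nat) : Int) = k := Int.toNat_of_nonneg hk0
        have hjlt : k.toNat + pat.length < lines.length := by omega
        have hjlt1 : k.toNat < lines.length := by omega
        -- hs lookups
        have hg1 : PySem.List.pyGetD (lines.map pvLh) k 0 = pvLh lines[k.toNat] := by
          rw [PySem.List.pyGetD_eq_getElem _ _ hk0 (by simp; omega)]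
          simp
        have hg2 : PySem.List.pyGetD (lines.map pvLh) (k + (pat.length : Int)) 0 = pvLh lines[k.toNat + pat.length] := by
          rw [PySem.List.pyGetD_eq_getElem _ _ (by omega) (by simp; omega)]
          have : (k + (pat.length : Int)).toNat = k.toNat + pat.length := by omega
          simp [this]
        -- window decompositions
        have hW : PySem.List.slice lines (some k) (some (k + (pat.length : Int))) =
            lines[k.toNat] :: (lines.drop (k.toNat+1)).take (pat.length-1) := by
          rw [pvSlice_window lines k pat.length hk0]
          exact pvWindow_cons lines k.toNat pat.length hμ hjlt1
        have hW' : PySem.List.slice lines (some (k+1)) (some (k + 1 + (pat.length : Int))) =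
            (lines.drop (k.toNat+1)).take (pat.length-1) ++ [lines[k.toNat + pat.length]] := by
          rw [pvSlice_window lines (k+1) pat.length (by omega)]
          have : (k+1).toNat = k.toNat + 1 := by omega
          rw [this]
          exact pvWindow_snoc lines k.toNat pat.length hμ hjlt
        have hT : ((lines.drop (k.toNat+1)).take (pat.length-1)).length = pat.length - 1 := by
          rw [List.length_take, List.length_drop]
          omega
        rw [hWinv, hg1, hg2, hW, hW', hpw hμ]
        set T := (lines.drop (k.toNat+1)).take (pat.length-1) with hTdef
        have hT2 : T.length = pat.length - 1 := by rw [hTdef]; exact hT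
        rw [← hT2]
        exact pvRoll lines[k.toNat] lines[k.toNat + pat.length] T
    · rw [PySem.List.pyRange_one_eq_nil (by omega)]
      rfl

theorem normalized_match_py_eq (snippet_lines file_lines : List String) :
    normalized_match_py snippet_lines file_lines = normalized_match_py_alt snippet_lines file_lines := by
  unfold normalized_match_py normalized_match_py_alt
  simp only [List.length_map]
  rw [pvLoopA_eq_find]
  have hcongr :
      (PySem.List.pyRange 0 ((file_lines.length:Int) - snippet_lines.length + 1) 1).find? (fun i =>
        decide ((PySem.List.pyRange i (i + (snippet_lines.length:Int)) 1).map
          (fun j => pvNorm (PySem.List.pyGetD file_lines j "")) = snippet_lines.map pvNorm)) =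
      (PySem.List.pyRange 0 ((file_lines.length:Int) - snippet_lines.length + 1) 1).find? (fun i =>
        decide (PySem.List.slice (file_lines.map pvNorm) (some i) (some (i + (snippet_lines.length:Int)))
          = snippet_lines.map pvNorm)) := by
    apply pvFind?_congr_mem
    intro i hi
    rw [PySem.List.mem_pyRange_one] at hi
    rw [pvWindow_eq file_lines i snippet_lines.length hi.1 (by omega)]
  rw [hcongr]
  by_cases hmn : (snippet_lines.length : Int) > (file_lines.length : Int)
  · rw [if_pos hmn, PySem.List.pyRange_one_eq_nil (by omega)]
    rfl
  · rw [if_neg hmn]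
    have hpw : (snippet_lines.map pvNorm).length ≠ 0 →
        (if (snippet_lines.length:Int) ≠ 0 then PySem.Int.powMod pvB ((snippet_lines.length:Int) - 1).toNat pvP else 1)
          = PySem.Int.powMod pvB ((snippet_lines.map pvNorm).length - 1) pvP := by
      intro h0
      rw [List.length_map] at h0
      rw [if_pos (by exact_mod_cast h0), List.length_map]
      congr 1
      omega
    have hinv0 : (PySem.List.slice ((file_lines.map pvNorm).map pvLh) none (some ((snippet_lines.length:Int)))).foldl
          (fun h v => PySem.Int.mod (h * pvB + v) pvP) 0
        = pvWhash (PySem.List.slice (file_lines.map pvNorm) (some 0) (some (0 + ((snippet_lines.map pvNorm).length:Int)))) := by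
      rw [show (0:Int) + ((snippet_lines.map pvNorm).length:Int) = ((snippet_lines.map pvNorm).length:Int) by ring]
      rw [PySem.List.slice_zero_start, List.length_map,
          PySem.List.slice_to _ (Int.natCast_nonneg _), PySem.List.slice_to _ (Int.natCast_nonneg _)]
      rw [← List.map_take, List.foldl_map]
      rfl
    have hB := pvLoopB_eq_find (snippet_lines.map pvNorm) (file_lines.map pvNorm)
      (if (snippet_lines.length:Int) ≠ 0 then PySem.Int.powMod pvB ((snippet_lines.length:Int) - 1).toNat pvP else 1)
      hpw (((file_lines.length:Int) - snippet_lines.length + 1).toNat) 0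
      ((PySem.List.slice ((file_lines.map pvNorm).map pvLh) none (some ((snippet_lines.length:Int)))).foldl
        (fun h v => PySem.Int.mod (h * pvB + v) pvP) 0)
      le_rfl (by simp) (fun _ => hinv0)
    simp only [List.length_map] at hB
    exact hB.symm

-- ===== VERDICT (by name: the statement is the Claim_ definition above) =====
theorem normalized_match_py_spec : Claim_equal_normalized_match_py := by
  intro snippet_lines file_lines _
  unfold Spec_normalized_match_py
  exact normalized_match_py_eq snippet_lines file_lines
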